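-- pv_equiv track=rewrite | github.com/rubelw/OSSS | src/OSSS/ai/agents/query_data/handlers/events_handler.py | _select_events_fields
-- ===== SOURCE A (Python) =====
-- from typing import Any, Dict, List, Sequence
--
-- def _select_events_fields(
--     rows: Sequence[Dict[str, Any]],
-- ) -> List[str]:
--     if not rows:
--         return []
--
--     preferred_order = [
--         "id",
--         "event_code",
--         "name",
--         "short_name",
--         "description",
--         "event_type",        # academic, athletics, activity, calendar, etc.
--         "category",
--         "school_id",
--         "school_name",
--         "facility_id",
--         "facility_name",
--         "start_datetime",
--         "end_datetime",
--         "all_day",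
--         "is_recurring",
--         "recurrence_rule",
--         "audience",          # students, staff, families, community
--         "is_public",
--         "status",
--         "created_at",
--         "updated_at",
--     ]
--
--     all_keys: List[str] = []
--     for r in rows:
--         for k in r.keys():
--             if k not in all_keys:
--                 all_keys.append(k)
--
--     ordered = [k for k in preferred_order if k in all_keys]
--     ordered.extend(k for k in all_keys if k not in ordered)
--     return ordered
-- ===== SOURCE B (Python) =====
-- from typing import Any, Dict, List, Sequence
--
-- def _select_events_fields(
--     rows: Sequence[Dict[str, Any]],
-- ) -> List[str]:
--     preferred_order = [
--         "id",
--         "event_code",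
--         "name",
--         "short_name",
--         "description",
--         "event_type",
--         "category",
--         "school_id",
--         "school_name",
--         "facility_id",
--         "facility_name",
--         "start_datetime",
--         "end_datetime",
--         "all_day",
--         "is_recurring",
--         "recurrence_rule",
--         "audience",
--         "is_public",
--         "status",
--         "created_at",
--         "updated_at",
--     ]
--     keys = list(dict.fromkeys(k for r in rows for k in r))
--     npref = len(preferred_order)
--
--     def rank(k: str) -> int:
--         return preferred_order.index(k) if k in preferred_order else npref + keys.index(k)
--
--     return sorted(keys, key=rank)
-- ===== Notes on version B (the rewrite author's own statement) =====
-- stated objective: alternative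
-- what changed: A partitions the deduplicated keys by filtering preferred_order and then extending with the leftovers; B deduplicates once with dict.fromkeys (O(n) hashing instead of A's linear 'k not in all_keys' scan per key) and performs a single sort under a numeric rank (position in preferred_order, else npref + first-seen position), whose unique keys make the order independent of sort stability.
import Mathlib
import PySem

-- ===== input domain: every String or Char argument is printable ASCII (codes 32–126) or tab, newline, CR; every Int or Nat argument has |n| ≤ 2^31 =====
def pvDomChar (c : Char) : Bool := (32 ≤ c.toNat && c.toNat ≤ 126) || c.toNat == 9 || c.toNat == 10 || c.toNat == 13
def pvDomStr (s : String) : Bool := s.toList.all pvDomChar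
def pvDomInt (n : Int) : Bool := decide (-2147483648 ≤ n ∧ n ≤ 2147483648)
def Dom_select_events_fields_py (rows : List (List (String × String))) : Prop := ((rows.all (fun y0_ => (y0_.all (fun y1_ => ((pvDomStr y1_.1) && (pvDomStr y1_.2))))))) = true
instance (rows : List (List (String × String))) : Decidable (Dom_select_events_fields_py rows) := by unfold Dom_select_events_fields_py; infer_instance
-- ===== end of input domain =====

-- B replaces A's filter-then-extend partition by an ordered dedup plus ONE sort under a
-- numeric rank (preferred position, else npref + first-seen position); objective: alternative.

-- the preferred_order literal shared by both Python versions
def pvPreferred : List String :=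
  ["id", "event_code", "name", "short_name", "description", "event_type", "category",
   "school_id", "school_name", "facility_id", "facility_name", "start_datetime",
   "end_datetime", "all_day", "is_recurring", "recurrence_rule", "audience",
   "is_public", "status", "created_at", "updated_at"]

-- ===== PORT A =====
def select_events_fields_py (rows : List (List (String × String))) : List String :=
  if rows = [] then []
  else
    -- for r in rows: for k in r.keys(): if k not in all_keys: all_keys.append(k)
    let all_keys : List String :=
      rows.foldl (fun acc r =>
        (PySem.Dict.ofList r).keys.foldl
          (fun a k => if !(a.contains k) then a ++ [k] else a) acc) []
    -- ordered = [k for k in preferred_order if k in all_keys]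
    let ordered := pvPreferred.filter (fun k => all_keys.contains k)
    -- ordered.extend(k for k in all_keys if k not in ordered)  (the generator sees the growing list)
    all_keys.foldl (fun o k => if !(o.contains k) then o ++ [k] else o) ordered

-- ===== PORT B =====
def select_events_fields_py_alt (rows : List (List (String × String))) : List String :=
  -- keys = list(dict.fromkeys(k for r in rows for k in r))
  let keys := PySem.List.dedup (rows.flatMap (fun r => (PySem.Dict.ofList r).keys))
  let npref : Int := pvPreferred.length
  -- rank(k) = preferred_order.index(k) if k in preferred_order else npref + keys.index(k)
  let rank : String → Int := fun k =>
    match PySem.List.index? pvPreferred k with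
    | some i => (i : Int)
    | none => npref + ((PySem.List.index? keys k).getD 0 : Int)  -- rank only meets k ∈ keys, where index? is some
  PySem.List.sorted keys rank false

-- ===== PRECONDITION & SPEC =====
def Spec_select_events_fields_py (rows : List (List (String × String))) (out : List String) : Prop := out = select_events_fields_py_alt rows
instance (rows : List (List (String × String))) (out : List String) : Decidable (Spec_select_events_fields_py rows out) := by unfold Spec_select_events_fields_py; infer_instance

-- ===== CLAIM (what is proved, stated in full; the proofs are below) =====
def Claim_equal_select_events_fields_py : Prop := ∀ (rows : List (List (String × String))), Dom_select_events_fields_py rows → Spec_select_events_fields_py rows (select_events_fields_py rows)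

-- ===== LEMMAS AND PROOFS =====

-- the numeric rank B sorts by, abstracted over the deduplicated key list (proof-side helper)
def pvRank (keys : List String) (k : String) : Int :=
  match PySem.List.index? pvPreferred k with
  | some i => (i : Int)
  | none => (pvPreferred.length : Int) + ((PySem.List.index? keys k).getD 0 : Int)

-- B's body with the flattened key stream abstracted (proof-side helper)
def pvAltCore (L : List String) : List String :=
  PySem.List.sorted (PySem.List.dedup L) (pvRank (PySem.List.dedup L)) false

lemma pvAlt_eq_core (rows : List (List (String × String))) :
    select_events_fields_py_alt rows
      = pvAltCore (rows.flatMap (fun r => (PySem.Dict.ofList r).keys)) := rfl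

-- A's append-if-absent step is PySem.Set.add
lemma pvStep_eq_add (a : List String) (k : String) :
    (if !(a.contains k) then a ++ [k] else a) = PySem.Set.add a k := by
  simp only [PySem.Set.add]
  rw [show PySem.Set.contains a k = a.contains k from rfl]
  cases h : a.contains k <;> rfl

-- A's extend loop over a duplicate-free list merely filters out the elements already present
lemma pvExtend_eq_filter (l : List String) (h : l.Nodup) : ∀ (acc : List String),
    l.foldl (fun o k => if !(o.contains k) then o ++ [k] else o) acc
      = acc ++ l.filter (fun k => !(acc.contains k)) := by
  induction l with
  | nil => intro acc; simp
  | cons x t ih =>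
    intro acc
    have hx : x ∉ t := (List.nodup_cons.mp h).1
    have ht : t.Nodup := (List.nodup_cons.mp h).2
    by_cases hc : acc.contains x
    · have h0 : (if !(acc.contains x) then acc ++ [x] else acc) = acc := by rw [hc]; rfl
      rw [List.foldl_cons, h0, ih ht acc, List.filter_cons]
      simp only [hc, Bool.not_true, Bool.false_eq_true, if_false]
    · have hc' : acc.contains x = false := by simpa using hc
      have h0 : (if !(acc.contains x) then acc ++ [x] else acc) = acc ++ [x] := by rw [hc']; rfl
      have hsame : t.filter (fun k => !((acc ++ [x]).contains k))
           = t.filter (fun k => !(acc.contains k)) := by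
        apply List.filter_congr
        intro y hy
        have hyx : y ≠ x := fun e => hx (e ▸ hy)
        simp [hyx]
      rw [List.foldl_cons, h0, ih ht (acc ++ [x]), hsame, List.filter_cons]
      simp only [hc', Bool.not_false, if_true]
      simp
-- every duplicate-free list is strictly increasing under its own idxOf
lemma pvPairwise_idxOf {l : List String} (h : l.Nodup) :
    l.Pairwise (fun a b => List.idxOf a l < List.idxOf b l) := by
  rw [List.pairwise_iff_getElem]
  intro i j hi hj hij
  rw [List.Nodup.idxOf_getElem h i hi, List.Nodup.idxOf_getElem h j hj]
  exact hij

-- membership gives index? = some idxOf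
lemma pvIndex?_of_mem {l : List String} {a : String} (h : a ∈ l) :
    PySem.List.index? l a = some (List.idxOf a l) := by
  have h1 : List.idxOf? a l ≠ none := by simp [List.idxOf?_eq_none_iff, h]
  obtain ⟨i, hi⟩ := Option.ne_none_iff_exists'.mp h1
  have h2 : List.idxOf a l = i := by
    rw [List.idxOf_eq_getD_idxOf?, hi]; rfl
  rw [PySem.List.index?_eq_idxOf?, hi, h2]

-- rank of a preferred key is its position in the preferred list
lemma pvRank_pref (keys : List String) {a : String} (ha : a ∈ pvPreferred) :
    pvRank keys a = (List.idxOf a pvPreferred : Int) := by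
  simp only [pvRank, pvIndex?_of_mem ha]

-- rank of a non-preferred key is npref + its first-seen position
lemma pvRank_rest (keys : List String) {b : String} (hb : b ∈ keys) (hbp : b ∉ pvPreferred) :
    pvRank keys b = (pvPreferred.length : Int) + (List.idxOf b keys : Int) := by
  have hn : PySem.List.index? pvPreferred b = none :=
    (PySem.List.index?_eq_none_iff _ _).mpr hbp
  simp only [pvRank, hn, pvIndex?_of_mem hb, Option.getD_some]

-- the core equality, for an arbitrary flattened key stream L
lemma pvCore (L : List String) :
    (L.foldl (fun a k => if !(a.contains k) then a ++ [k] else a) []).foldl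
      (fun o k => if !(o.contains k) then o ++ [k] else o)
      (pvPreferred.filter (fun k =>
        (L.foldl (fun a k => if !(a.contains k) then a ++ [k] else a) []).contains k))
    = pvAltCore L := by
  have hK : L.foldl (fun a k => if !(a.contains k) then a ++ [k] else a) []
      = PySem.List.dedup L := by
    rw [PySem.List.dedup_eq_ofList]
    simp only [PySem.Set.ofList]
    congr 1
    funext a k
    exact pvStep_eq_add a k
  rw [hK]
  have hnodup : (PySem.List.dedup L).Nodup := PySem.List.nodup_dedup L
  set keys : List String := PySem.List.dedup L with hkeys
  rw [pvExtend_eq_filter keys hnodup]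
  have hfc : keys.filter (fun k => !((pvPreferred.filter (fun k => keys.contains k)).contains k))
       = keys.filter (fun k => !(pvPreferred.contains k)) := by
    apply List.filter_congr
    intro x hx
    have hxk : x ∈ keys := hx
    have h1 : (pvPreferred.filter (fun k => keys.contains k)).contains x = pvPreferred.contains x := by
      by_cases hp : x ∈ pvPreferred
      · have hm : x ∈ pvPreferred.filter (fun k => keys.contains k) :=
          List.mem_filter.mpr ⟨hp, by simpa [List.contains_iff_mem] using hxk⟩
        simp only [List.contains_iff_mem.mpr hm, List.contains_iff_mem.mpr hp]
      · have hm : x ∉ pvPreferred.filter (fun k => keys.contains k) :=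
          fun hmem => hp (List.mem_filter.mp hmem).1
        have c1 : (pvPreferred.filter (fun k => keys.contains k)).contains x = false := by
          simpa [List.contains_iff_mem] using hm
        have c2 : pvPreferred.contains x = false := by
          simpa [List.contains_iff_mem] using hp
        rw [c1, c2]
    rw [h1]
  rw [hfc]
  have hPnd : pvPreferred.Nodup := by decide
  have hordnd : (pvPreferred.filter (fun k => keys.contains k)).Nodup := hPnd.filter _
  have hperm1 : (pvPreferred.filter (fun k => keys.contains k)).Perm
      (keys.filter (fun k => pvPreferred.contains k)) := by
    rw [List.perm_ext_iff_of_nodup hordnd (hnodup.filter _)]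
    intro a
    simp only [List.mem_filter, List.contains_iff_mem]
    tauto
  have hperm : (pvPreferred.filter (fun k => keys.contains k)
      ++ keys.filter (fun k => !(pvPreferred.contains k))).Perm keys :=
    (hperm1.append_right _).trans (List.filter_append_perm _ keys)
  have hpw : (pvPreferred.filter (fun k => keys.contains k)
      ++ keys.filter (fun k => !(pvPreferred.contains k))).Pairwise
      (fun a b => pvRank keys a < pvRank keys b) := by
    rw [List.pairwise_append]
    refine ⟨?_, ?_, ?_⟩
    · have base : (pvPreferred.filter (fun k => keys.contains k)).Pairwise
          (fun a b => List.idxOf a pvPreferred < List.idxOf b pvPreferred) :=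
        (pvPairwise_idxOf hPnd).sublist (List.filter_sublist)
      refine base.imp_of_mem ?_
      intro a b ha hb hlt
      have ha' := (List.mem_filter.mp ha).1
      have hb' := (List.mem_filter.mp hb).1
      rw [pvRank_pref keys ha', pvRank_pref keys hb']
      exact_mod_cast hlt
    · have base : (keys.filter (fun k => !(pvPreferred.contains k))).Pairwise
          (fun a b => List.idxOf a keys < List.idxOf b keys) :=
        (pvPairwise_idxOf hnodup).sublist (List.filter_sublist)
      refine base.imp_of_mem ?_
      intro a b ha hb hlt
      have ha1 := (List.mem_filter.mp ha).1
      have ha2 : a ∉ pvPreferred := by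
        have := (List.mem_filter.mp ha).2
        simpa [List.contains_iff_mem] using this
      have hb1 := (List.mem_filter.mp hb).1
      have hb2 : b ∉ pvPreferred := by
        have := (List.mem_filter.mp hb).2
        simpa [List.contains_iff_mem] using this
      rw [pvRank_rest keys ha1 ha2, pvRank_rest keys hb1 hb2]
      omega
    · intro a ha b hb
      have ha' := (List.mem_filter.mp ha).1
      have hb1 := (List.mem_filter.mp hb).1
      have hb2 : b ∉ pvPreferred := by
        have := (List.mem_filter.mp hb).2
        simpa [List.contains_iff_mem] using this
      rw [pvRank_pref keys ha', pvRank_rest keys hb1 hb2]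
      have h1 : List.idxOf a pvPreferred < pvPreferred.length :=
        List.idxOf_lt_length_of_mem ha'
      omega
  exact (PySem.List.sorted_eq_of_perm_of_pairwise_lt keys _ (pvRank keys) hperm hpw).symm

-- ===== VERDICT (by name: the statement is the Claim_ definition above) =====
theorem select_events_fields_py_spec : Claim_equal_select_events_fields_py := by
  intro rows _
  unfold Spec_select_events_fields_py
  by_cases h : rows = []
  · subst h; decide
  · rw [pvAlt_eq_core]
    have hflat := pvCore (rows.flatMap (fun r => (PySem.Dict.ofList r).keys))
    unfold select_events_fields_py
    rw [if_neg h]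
    simp only [List.foldl_flatMap] at hflat
    exact hflat
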